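-- pv_equiv track=rewrite | github.com/Kory111111111111111111/SampleManager | sample_manager_universal.py | _get_drums_subcategory
-- ===== SOURCE A (Python) =====
-- def _get_drums_subcategory(file_name: str) -> str:
--     """Get drums subcategory based on file name."""
--     if any(kw in file_name for kw in ['kick', 'bd', 'bassdrum']):
--         return "Kicks"
--     elif any(kw in file_name for kw in ['snare', 'sd', 'snr']):
--         return "Snares"
--     elif any(kw in file_name for kw in ['clap', 'handclap']):
--         return "Claps"
--     elif any(kw in file_name for kw in ['closed hat', 'closehat', 'closed_hat', 'chh', 'cl hat', 'clhat', 'close hat']):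
--         return "Closed Hi-Hats"
--     elif any(kw in file_name for kw in ['open hat', 'openhat', 'open_hat', 'ohh', 'op hat', 'ophat']):
--         return "Open Hi-Hats"
--     elif any(kw in file_name for kw in ['hat', 'hh', 'hihat', 'hi-hat', 'hi hat']):
--         return "Closed Hi-Hats"  # Default generic hi-hats to closed (more common)
--     elif any(kw in file_name for kw in ['cymbal', 'crash', 'ride', 'splash']):
--         return "Cymbals"
--     elif any(kw in file_name for kw in ['perc', 'shaker', 'tambourine']):
--         return "Percussion"
--     else:
--         return "Full Loops"
-- ===== SOURCE B (Python) =====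
-- # Different algorithm: instead of running a substring search per keyword in a
-- # first-match ladder, scan the filename once left to right; at each position,
-- # check which keywords start there (anchored startswith) and keep the minimum
-- # rule priority seen.  The label of the minimum matched priority is returned
-- # (priority 8 = no match = "Full Loops").
--
-- _GROUPS = [
--     ['kick', 'bd', 'bassdrum'],
--     ['snare', 'sd', 'snr'],
--     ['clap', 'handclap'],
--     ['closed hat', 'closehat', 'closed_hat', 'chh', 'cl hat', 'clhat', 'close hat'],
--     ['open hat', 'openhat', 'open_hat', 'ohh', 'op hat', 'ophat'],
--     ['hat', 'hh', 'hihat', 'hi-hat', 'hi hat'],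
--     ['cymbal', 'crash', 'ride', 'splash'],
--     ['perc', 'shaker', 'tambourine'],
-- ]
-- _LABELS = ["Kicks", "Snares", "Claps", "Closed Hi-Hats", "Open Hi-Hats",
--            "Closed Hi-Hats", "Cymbals", "Percussion", "Full Loops"]
-- _KEYWORDS = [(kw, p) for p, kws in enumerate(_GROUPS) for kw in kws]
--
-- def _get_drums_subcategory(file_name: str) -> str:
--     best = len(_GROUPS)  # sentinel: nothing matched yet
--     for i in range(len(file_name)):
--         for kw, p in _KEYWORDS:
--             if p < best and file_name.startswith(kw, i):
--                 best = p
--     return _LABELS[best]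
-- ===== Notes on version B (the rewrite author's own statement) =====
-- stated objective: alternative
-- what changed: A runs a substring search per keyword through an ordered if/elif ladder (first match wins); B scans the filename once left to right, checking anchored startswith matches of all keywords at each position while maintaining the minimum matched rule priority, then indexes a label table with that minimum.
import Mathlib
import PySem

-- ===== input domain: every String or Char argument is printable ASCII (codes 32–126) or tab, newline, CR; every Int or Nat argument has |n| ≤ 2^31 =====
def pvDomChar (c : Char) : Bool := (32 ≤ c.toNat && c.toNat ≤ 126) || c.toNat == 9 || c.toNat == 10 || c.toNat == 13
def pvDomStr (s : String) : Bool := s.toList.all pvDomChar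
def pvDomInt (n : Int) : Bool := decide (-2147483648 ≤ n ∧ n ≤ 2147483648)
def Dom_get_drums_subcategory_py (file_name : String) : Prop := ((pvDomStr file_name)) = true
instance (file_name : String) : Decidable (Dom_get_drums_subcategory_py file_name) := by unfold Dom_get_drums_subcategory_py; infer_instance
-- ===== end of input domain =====

-- B replaces A's per-keyword substring-search ladder by a single left-to-right scan of the
-- filename that keeps the minimum matched rule priority (anchored startswith at each position)
-- and indexes a label table with it (objective: alternative).


-- ===== PORT A =====
-- literal if/elif ladder; 'kw in file_name' = PySem.Str.isIn kw file_name
def get_drums_subcategory_py (file_name : String) : String :=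
  if ["kick", "bd", "bassdrum"].any (fun kw => PySem.Str.isIn kw file_name) then
    "Kicks"
  else if ["snare", "sd", "snr"].any (fun kw => PySem.Str.isIn kw file_name) then
    "Snares"
  else if ["clap", "handclap"].any (fun kw => PySem.Str.isIn kw file_name) then
    "Claps"
  else if ["closed hat", "closehat", "closed_hat", "chh", "cl hat", "clhat", "close hat"].any
      (fun kw => PySem.Str.isIn kw file_name) then
    "Closed Hi-Hats"
  else if ["open hat", "openhat", "open_hat", "ohh", "op hat", "ophat"].any
      (fun kw => PySem.Str.isIn kw file_name) then
    "Open Hi-Hats"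
  else if ["hat", "hh", "hihat", "hi-hat", "hi hat"].any (fun kw => PySem.Str.isIn kw file_name) then
    "Closed Hi-Hats"
  else if ["cymbal", "crash", "ride", "splash"].any (fun kw => PySem.Str.isIn kw file_name) then
    "Cymbals"
  else if ["perc", "shaker", "tambourine"].any (fun kw => PySem.Str.isIn kw file_name) then
    "Percussion"
  else
    "Full Loops"

-- ===== PORT B =====
def drumGroups : List (List String) :=
  [ ["kick", "bd", "bassdrum"],
    ["snare", "sd", "snr"],
    ["clap", "handclap"],
    ["closed hat", "closehat", "closed_hat", "chh", "cl hat", "clhat", "close hat"],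
    ["open hat", "openhat", "open_hat", "ohh", "op hat", "ophat"],
    ["hat", "hh", "hihat", "hi-hat", "hi hat"],
    ["cymbal", "crash", "ride", "splash"],
    ["perc", "shaker", "tambourine"] ]

def drumLabels : List String :=
  ["Kicks", "Snares", "Claps", "Closed Hi-Hats", "Open Hi-Hats",
   "Closed Hi-Hats", "Cymbals", "Percussion", "Full Loops"]

-- _KEYWORDS = [(kw, p) for p, kws in enumerate(_GROUPS) for kw in kws]
-- (enumerate over the 8 concrete groups ported via zipIdx; keywords kept as Char lists)
def drumKeywords : List (List Char × Nat) :=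
  drumGroups.zipIdx.flatMap (fun pk => pk.1.map (fun kw => (kw.toList, pk.2)))

-- the position scan of Source B: best = min priority matched at any position, else 8;
-- file_name.startswith(kw, i) with 0 ≤ i < len(file_name) is exactly
-- kw.toList.isPrefixOf (file_name.toList.drop i); _LABELS[best] (always in range) = getD
def get_drums_subcategory_py_alt (file_name : String) : String :=
  let sl := file_name.toList
  let best := (List.range sl.length).foldl
    (fun b i => drumKeywords.foldl
      (fun b kp => if kp.2 < b ∧ kp.1.isPrefixOf (sl.drop i) = true then kp.2 else b) b)
    drumGroups.length
  drumLabels.getD best "Full Loops"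

-- ===== PRECONDITION & SPEC =====
def Spec_get_drums_subcategory_py (file_name : String) (out : String) : Prop := out = get_drums_subcategory_py_alt file_name
instance (file_name : String) (out : String) : Decidable (Spec_get_drums_subcategory_py file_name out) := by unfold Spec_get_drums_subcategory_py; infer_instance

-- ===== CLAIM =====
def Claim_equal_get_drums_subcategory_py : Prop := ∀ (file_name : String), Dom_get_drums_subcategory_py file_name → Spec_get_drums_subcategory_py file_name (get_drums_subcategory_py file_name)

-- ===== LEMMAS AND PROOFS =====

-- the inner fold of B's scan, over an arbitrary keyword list, against the suffix d
def pvInner (d : List Char) (b : Nat) (l : List (List Char × Nat)) : Nat :=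
  l.foldl (fun b kp => if kp.2 < b ∧ kp.1.isPrefixOf d = true then kp.2 else b) b

-- the outer fold of B's scan over a list of positions (keyword list kept abstract)
def pvOuter (K : List (List Char × Nat)) (sl : List Char) (b : Nat) (idxs : List Nat) : Nat :=
  idxs.foldl (fun b i => pvInner (sl.drop i) b K) b

lemma pvInner_le (l : List (List Char × Nat)) (d : List Char) (b : Nat) :
    pvInner d b l ≤ b := by
  induction l generalizing b with
  | nil => simp [pvInner]
  | cons a l ih =>
    have hstep : pvInner d b (a :: l) =
        pvInner d (if a.2 < b ∧ a.1.isPrefixOf d = true then a.2 else b) l := rfl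
    rw [hstep]
    refine le_trans (ih _) ?_
    split_ifs with h
    · omega
    · exact le_rfl

lemma pvInner_le_mem (l : List (List Char × Nat)) (d : List Char) (kp : List Char × Nat) :
    ∀ b, kp ∈ l → kp.1.isPrefixOf d = true → pvInner d b l ≤ kp.2 := by
  induction l with
  | nil => intro b hm _; simp at hm
  | cons a l ih =>
    intro b hm hp
    have hstep : pvInner d b (a :: l) =
        pvInner d (if a.2 < b ∧ a.1.isPrefixOf d = true then a.2 else b) l := rfl
    rw [hstep]
    rcases List.mem_cons.mp hm with rfl | hm'
    · refine le_trans (pvInner_le _ _ _) ?_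
      split_ifs with h
      · exact le_rfl
      · simp [hp] at h; omega
    · exact ih _ hm' hp

lemma pvInner_attain (l : List (List Char × Nat)) (d : List Char) :
    ∀ b, pvInner d b l = b ∨ ∃ kp ∈ l, kp.1.isPrefixOf d = true ∧ pvInner d b l = kp.2 := by
  induction l with
  | nil => intro b; left; simp [pvInner]
  | cons a l ih =>
    intro b
    have hstep : pvInner d b (a :: l) =
        pvInner d (if a.2 < b ∧ a.1.isPrefixOf d = true then a.2 else b) l := rfl
    rw [hstep]
    split_ifs with h
    · rcases ih a.2 with h' | ⟨kp, hm, hp, he⟩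
      · exact Or.inr ⟨a, List.mem_cons_self .., h.2, h'⟩
      · exact Or.inr ⟨kp, List.mem_cons_of_mem _ hm, hp, he⟩
    · rcases ih b with h' | ⟨kp, hm, hp, he⟩
      · exact Or.inl h'
      · exact Or.inr ⟨kp, List.mem_cons_of_mem _ hm, hp, he⟩

lemma pvOuter_le (K : List (List Char × Nat)) (idxs : List Nat) (sl : List Char) (b : Nat) :
    pvOuter K sl b idxs ≤ b := by
  induction idxs generalizing b with
  | nil => simp [pvOuter]
  | cons i l ih =>
    have hstep : pvOuter K sl b (i :: l) =
        pvOuter K sl (pvInner (sl.drop i) b K) l := rfl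
    rw [hstep]
    exact le_trans (ih _) (pvInner_le _ _ _)

lemma pvOuter_le_mem (K : List (List Char × Nat)) (idxs : List Nat) (sl : List Char)
    (i : Nat) (kp : List Char × Nat) :
    ∀ b, i ∈ idxs → kp ∈ K → kp.1.isPrefixOf (sl.drop i) = true →
      pvOuter K sl b idxs ≤ kp.2 := by
  induction idxs with
  | nil => intro b hi _ _; simp at hi
  | cons j l ih =>
    intro b hi hm hp
    have hstep : pvOuter K sl b (j :: l) =
        pvOuter K sl (pvInner (sl.drop j) b K) l := rfl
    rw [hstep]
    rcases List.mem_cons.mp hi with rfl | hi'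
    · exact le_trans (pvOuter_le _ _ _ _) (pvInner_le_mem _ _ _ _ hm hp)
    · exact ih _ hi' hm hp

lemma pvOuter_attain (K : List (List Char × Nat)) (idxs : List Nat) (sl : List Char) :
    ∀ b, pvOuter K sl b idxs = b ∨
      ∃ i ∈ idxs, ∃ kp ∈ K, kp.1.isPrefixOf (sl.drop i) = true ∧
        pvOuter K sl b idxs = kp.2 := by
  induction idxs with
  | nil => intro b; left; simp [pvOuter]
  | cons j l ih =>
    intro b
    have hstep : pvOuter K sl b (j :: l) =
        pvOuter K sl (pvInner (sl.drop j) b K) l := rfl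
    rw [hstep]
    rcases ih (pvInner (sl.drop j) b K) with h' | ⟨i, hi, kp, hm, hp, he⟩
    · rw [h']
      rcases pvInner_attain K (sl.drop j) b with h'' | ⟨kp, hm, hp, he⟩
      · exact Or.inl h''
      · exact Or.inr ⟨j, List.mem_cons_self .., kp, hm, hp, he⟩
    · exact Or.inr ⟨i, List.mem_cons_of_mem _ hi, kp, hm, hp, he⟩

-- nonempty keyword: infix of sl ↔ anchored prefix at some position i < |sl|
lemma infix_iff_pos (kw sl : List Char) (hne : kw ≠ []) :
    (∃ i, i ∈ List.range sl.length ∧ kw.isPrefixOf (sl.drop i) = true) ↔ kw <:+: sl := by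
  constructor
  · rintro ⟨i, _, hp⟩
    exact (List.isPrefixOf_iff_prefix.mp hp).isInfix.trans (List.drop_suffix i sl).isInfix
  · rintro ⟨t, u, rfl⟩
    refine ⟨t.length, ?_, ?_⟩
    · have : kw.length ≠ 0 := by simpa using hne
      simp only [List.mem_range, List.length_append]
      omega
    · rw [List.isPrefixOf_iff_prefix]
      have hd : (t ++ (kw ++ u)).drop t.length = kw ++ u := by simp
      rw [List.append_assoc, hd]
      exact List.prefix_append kw u

-- A's keyword groups indexed by priority (as in the port's ladder), for the proof
def pvGrpS : Nat → List String
  | 0 => ["kick", "bd", "bassdrum"]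
  | 1 => ["snare", "sd", "snr"]
  | 2 => ["clap", "handclap"]
  | 3 => ["closed hat", "closehat", "closed_hat", "chh", "cl hat", "clhat", "close hat"]
  | 4 => ["open hat", "openhat", "open_hat", "ohh", "op hat", "ophat"]
  | 5 => ["hat", "hh", "hihat", "hi-hat", "hi hat"]
  | 6 => ["cymbal", "crash", "ride", "splash"]
  | 7 => ["perc", "shaker", "tambourine"]
  | _ => []

lemma mem_drumKeywords : ∀ j ∈ List.range 8, ∀ kw ∈ pvGrpS j,
    kw.toList ≠ [] ∧ (kw.toList, j) ∈ drumKeywords := by decide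

lemma drumKeywords_mem : ∀ kp ∈ drumKeywords,
    kp.2 < 8 ∧ (pvGrpS kp.2).any (fun kw => kw.toList == kp.1) = true := by decide

-- any matched table pair makes its whole group's A-side condition true
lemma group_any_of_pair (file_name : String) (i' : Nat) (kp : List Char × Nat)
    (hkp : kp ∈ drumKeywords) (hp' : kp.1.isPrefixOf (file_name.toList.drop i') = true) :
    ((pvGrpS kp.2).any fun kw => PySem.Str.isIn kw file_name) = true := by
  rcases List.any_eq_true.mp (drumKeywords_mem kp hkp).2 with ⟨kw', hm', hbeq⟩
  have hkpeq : kw'.toList = kp.1 := by simpa using hbeq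
  have hinf' : kp.1 <:+: file_name.toList :=
    (List.isPrefixOf_iff_prefix.mp hp').isInfix.trans
      (List.drop_suffix i' file_name.toList).isInfix
  refine List.any_eq_true.mpr ⟨kw', hm', ?_⟩
  rw [PySem.Str.isIn_eq]
  exact (PySem.Chars.isIn_iff_infix _ _).mpr (hkpeq ▸ hinf')

-- B's scan value when group j is the first (least-priority) matching group
lemma pvOuter_eq_of (file_name : String) (j : Nat) (hj8 : j < 8)
    (hj : ((pvGrpS j).any fun kw => PySem.Str.isIn kw file_name) = true)
    (hlt : ∀ p, p < j → ((pvGrpS p).any fun kw => PySem.Str.isIn kw file_name) = false) :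
    pvOuter drumKeywords file_name.toList 8 (List.range file_name.toList.length) = j := by
  rcases List.any_eq_true.mp hj with ⟨kw, hm, hin⟩
  have hkw := mem_drumKeywords j (List.mem_range.mpr hj8) kw hm
  have hinf : kw.toList <:+: file_name.toList := by
    rw [PySem.Str.isIn_eq] at hin
    exact (PySem.Chars.isIn_iff_infix _ _).mp hin
  rcases (infix_iff_pos kw.toList file_name.toList hkw.1).mpr hinf with ⟨i, hi, hp⟩
  have hle : pvOuter drumKeywords file_name.toList 8 (List.range file_name.toList.length) ≤ j :=
    pvOuter_le_mem _ _ _ i (kw.toList, j) _ hi hkw.2 hp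
  rcases pvOuter_attain drumKeywords (List.range file_name.toList.length) file_name.toList 8 with h8 | h
  · omega
  · rcases h with ⟨i', _, kp, hkp, hp', he⟩
    have hany := group_any_of_pair file_name i' kp hkp hp'
    by_cases hlt' : kp.2 < j
    · rw [hlt _ hlt'] at hany
      exact absurd hany (by decide)
    · omega

-- B's scan value when no group matches
lemma pvOuter_eq_8 (file_name : String)
    (hall : ∀ p, p < 8 → ((pvGrpS p).any fun kw => PySem.Str.isIn kw file_name) = false) :
    pvOuter drumKeywords file_name.toList 8 (List.range file_name.toList.length) = 8 := by
  rcases pvOuter_attain drumKeywords (List.range file_name.toList.length) file_name.toList 8 with h8 | h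
  · exact h8
  · rcases h with ⟨i', _, kp, hkp, hp', he⟩
    have hany := group_any_of_pair file_name i' kp hkp hp'
    rw [hall _ (drumKeywords_mem kp hkp).1] at hany
    exact absurd hany (by decide)

-- B's port, written through pvOuter (definitional)
lemma alt_eq (file_name : String) :
    get_drums_subcategory_py_alt file_name =
      drumLabels.getD (pvOuter drumKeywords file_name.toList 8 (List.range file_name.toList.length))
        "Full Loops" := rfl

-- ===== VERDICT =====
theorem get_drums_subcategory_py_spec : Claim_equal_get_drums_subcategory_py := by
  intro file_name _
  unfold Spec_get_drums_subcategory_py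
  rw [alt_eq]
  unfold get_drums_subcategory_py
  by_cases h0 : (["kick", "bd", "bassdrum"].any fun kw => PySem.Str.isIn kw file_name) = true
  · rw [if_pos h0, pvOuter_eq_of file_name 0 (by omega) h0
      (fun p hp => absurd hp (Nat.not_lt_zero p))]
    rfl
  · rw [if_neg h0]
    rw [Bool.not_eq_true] at h0
    by_cases h1 : (["snare", "sd", "snr"].any fun kw => PySem.Str.isIn kw file_name) = true
    · rw [if_pos h1, pvOuter_eq_of file_name 1 (by omega) h1
        (by intro p hp; interval_cases p; exact h0)]
      rfl
    · rw [if_neg h1]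
      rw [Bool.not_eq_true] at h1
      by_cases h2 : (["clap", "handclap"].any fun kw => PySem.Str.isIn kw file_name) = true
      · rw [if_pos h2, pvOuter_eq_of file_name 2 (by omega) h2
          (by intro p hp; interval_cases p
              · exact h0
              · exact h1)]
        rfl
      · rw [if_neg h2]
        rw [Bool.not_eq_true] at h2
        by_cases h3 : (["closed hat", "closehat", "closed_hat", "chh", "cl hat", "clhat",
            "close hat"].any fun kw => PySem.Str.isIn kw file_name) = true
        · rw [if_pos h3, pvOuter_eq_of file_name 3 (by omega) h3
            (by intro p hp; interval_cases p
                · exact h0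
                · exact h1
                · exact h2)]
          rfl
        · rw [if_neg h3]
          rw [Bool.not_eq_true] at h3
          by_cases h4 : (["open hat", "openhat", "open_hat", "ohh", "op hat",
              "ophat"].any fun kw => PySem.Str.isIn kw file_name) = true
          · rw [if_pos h4, pvOuter_eq_of file_name 4 (by omega) h4
              (by intro p hp; interval_cases p
                  · exact h0
                  · exact h1
                  · exact h2
                  · exact h3)]
            rfl
          · rw [if_neg h4]
            rw [Bool.not_eq_true] at h4
            by_cases h5 : (["hat", "hh", "hihat", "hi-hat",
                "hi hat"].any fun kw => PySem.Str.isIn kw file_name) = true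
            · rw [if_pos h5, pvOuter_eq_of file_name 5 (by omega) h5
                (by intro p hp; interval_cases p
                    · exact h0
                    · exact h1
                    · exact h2
                    · exact h3
                    · exact h4)]
              rfl
            · rw [if_neg h5]
              rw [Bool.not_eq_true] at h5
              by_cases h6 : (["cymbal", "crash", "ride",
                  "splash"].any fun kw => PySem.Str.isIn kw file_name) = true
              · rw [if_pos h6, pvOuter_eq_of file_name 6 (by omega) h6
                  (by intro p hp; interval_cases p
                      · exact h0
                      · exact h1
                      · exact h2
                      · exact h3
                      · exact h4
                      · exact h5)]
                rfl
              · rw [if_neg h6]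
                rw [Bool.not_eq_true] at h6
                by_cases h7 : (["perc", "shaker",
                    "tambourine"].any fun kw => PySem.Str.isIn kw file_name) = true
                · rw [if_pos h7, pvOuter_eq_of file_name 7 (by omega) h7
                    (by intro p hp; interval_cases p
                        · exact h0
                        · exact h1
                        · exact h2
                        · exact h3
                        · exact h4
                        · exact h5
                        · exact h6)]
                  rfl
                · rw [if_neg h7]
                  rw [Bool.not_eq_true] at h7
                  rw [pvOuter_eq_8 file_name
                    (by intro p hp; interval_cases p
                        · exact h0
                        · exact h1
                        · exact h2
                        · exact h3
                        · exact h4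
                        · exact h5
                        · exact h6
                        · exact h7)]
                  rfl
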